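-- pv_equiv track=rewrite | github.com/yash-gada/LeetCode | Python/Find_The_Original_Array_of_Prefix_Xor.py | findArray
-- ===== SOURCE A (Python) =====
-- from typing import List
--
-- def findArray(pref: List[int]) -> List[int]:
--
--     if(len(pref) == 0):
--         return None
--     if(len(pref) == 1):
--         return pref
--
--     xor = []
--     xor.append(pref[0])
--     check = pref[0]
--
--     for i in range(1, len(pref)):
--         xor.append(check^pref[i])
--         check = check^xor[-1]
--
--     return xor
-- ===== SOURCE B (Python) =====
-- def findArray(pref):
--     if not pref:
--         return None
--     return [pref[0]] + [a ^ b for a, b in zip(pref, pref[1:])]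
-- ===== Notes on version B (the rewrite author's own statement) =====
-- stated objective: simpler
-- what changed: Drops the running accumulator `check` (and the separate length-1 guard): each element is read statelessly as the XOR of adjacent prefix entries via zip(pref, pref[1:]).
import Mathlib
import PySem

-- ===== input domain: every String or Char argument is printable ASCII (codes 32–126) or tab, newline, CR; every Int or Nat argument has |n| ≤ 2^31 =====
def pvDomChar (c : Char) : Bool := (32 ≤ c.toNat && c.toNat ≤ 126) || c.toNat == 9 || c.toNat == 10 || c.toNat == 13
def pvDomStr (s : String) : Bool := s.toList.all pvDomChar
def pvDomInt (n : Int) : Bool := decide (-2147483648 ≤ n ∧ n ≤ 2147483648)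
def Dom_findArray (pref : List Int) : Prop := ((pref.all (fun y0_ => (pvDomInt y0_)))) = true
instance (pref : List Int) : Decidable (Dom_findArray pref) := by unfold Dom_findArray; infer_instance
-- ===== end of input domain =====

-- B replaces A's running accumulator with a stateless read of adjacent prefix entries (pref[i] ^ pref[i-1]); objective: simpler.


-- ===== PORT A =====
-- Literal port of A. `xor.append(check^pref[i])` appends `bxor check pref[i]`;
-- `check = check^xor[-1]` reads back exactly that just-appended value, i.e.
-- `bxor check (bxor check pref[i])`; `pref[i]` (always in range here) is pyGetD.
def findArray (pref : List Int) : Option (List Int) :=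
  if pref.length = 0 then none
  else if pref.length = 1 then some pref
  else
    some (((PySem.List.pyRange 1 (pref.length : Int) 1).foldl
      (fun (st : List Int × Int) i =>
        (st.1 ++ [PySem.Int.bxor st.2 (PySem.List.pyGetD pref i 0)],
         PySem.Int.bxor st.2 (PySem.Int.bxor st.2 (PySem.List.pyGetD pref i 0))))
      ([PySem.List.pyGetD pref 0 0], PySem.List.pyGetD pref 0 0)).1)

-- ===== PORT B =====
-- Port of B: head of pref followed by XORs of adjacent pairs (zip(pref, pref[1:])).
def findArray_alt (pref : List Int) : Option (List Int) :=
  match pref with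
  | [] => none
  | x :: _ => some (x :: List.zipWith (fun a b => PySem.Int.bxor a b) pref (pref.drop 1))

-- ===== PRECONDITION & SPEC =====
def Spec_findArray (pref : List Int) (out : Option (List Int)) : Prop := out = findArray_alt pref
instance (pref : List Int) (out : Option (List Int)) : Decidable (Spec_findArray pref out) := by unfold Spec_findArray; infer_instance

-- ===== CLAIM (what is proved, stated in full; the proofs are below) =====
def Claim_equal_findArray : Prop := ∀ (pref : List Int), Dom_findArray pref → Spec_findArray pref (findArray pref)

-- ===== LEMMAS AND PROOFS =====

-- XOR cancellation on Python-exact integers: c ^ (c ^ v) = v.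
theorem bxor_cancel (c v : Int) : PySem.Int.bxor c (PySem.Int.bxor c v) = v := by
  unfold PySem.Int.bxor
  by_cases hc : 0 ≤ c <;> by_cases hv : 0 ≤ v <;> simp only [hc, hv, if_pos, if_neg, not_false_iff]
  · rw [if_pos (by positivity : (0:Int) ≤ ((c.toNat ^^^ v.toNat : Nat) : Int))]
    simp [Int.toNat_of_nonneg hv]
  · rw [if_neg (by omega : ¬ (0:Int) ≤ -((c.toNat ^^^ (-v - 1).toNat : Nat) : Int) - 1)]
    have h1 : (-(-((c.toNat ^^^ (-v - 1).toNat : Nat) : Int) - 1) - 1).toNat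
        = c.toNat ^^^ (-v - 1).toNat := by omega
    rw [h1, ← Nat.xor_assoc, Nat.xor_self, Nat.zero_xor]
    omega
  · rw [if_neg (by omega : ¬ (0:Int) ≤ -(((-c - 1).toNat ^^^ v.toNat : Nat) : Int) - 1)]
    have h1 : (-(-(((-c - 1).toNat ^^^ v.toNat : Nat) : Int) - 1) - 1).toNat
        = (-c - 1).toNat ^^^ v.toNat := by omega
    rw [h1, ← Nat.xor_assoc, Nat.xor_self, Nat.zero_xor]
    omega
  · rw [if_pos (by positivity : (0:Int) ≤ (((-c - 1).toNat ^^^ (-v - 1).toNat : Nat) : Int))]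
    have h1 : ((((-c - 1).toNat ^^^ (-v - 1).toNat : Nat) : Int)).toNat
        = (-c - 1).toNat ^^^ (-v - 1).toNat := by omega
    rw [h1, ← Nat.xor_assoc, Nat.xor_self, Nat.zero_xor]
    omega

-- A's loop over `pref.drop 1` builds exactly the adjacent-XOR list:
-- the running `check` always equals the previous prefix entry.
theorem findArray_loop (xs : List Int) : ∀ (acc : List Int) (c : Int),
    xs.foldl (fun (st : List Int × Int) v =>
        (st.1 ++ [PySem.Int.bxor st.2 v],
         PySem.Int.bxor st.2 (PySem.Int.bxor st.2 v))) (acc, c)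
      = (acc ++ List.zipWith (fun a b => PySem.Int.bxor a b) (c :: xs) xs,
         (c :: xs).getLastD 0) := by
  induction xs with
  | nil => intro acc c; simp
  | cons v rest ih =>
      intro acc c
      rw [List.foldl_cons, ih]
      simp [bxor_cancel]

-- ===== VERDICT (by name: the statement is the Claim_ definition above) =====
theorem findArray_spec : Claim_equal_findArray := by
  intro pref _
  unfold Spec_findArray findArray findArray_alt
  match pref with
  | [] => simp
  | [x] => simp
  | x :: y :: t =>
      rw [if_neg (show ¬ ((x :: y :: t).length = 0) by simp),
          if_neg (show ¬ ((x :: y :: t).length = 1) by simp)]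
      rw [PySem.List.foldl_pyRange_pyGetD' (x :: y :: t) 0
        (fun (st : List Int × Int) w =>
          (st.1 ++ [PySem.Int.bxor st.2 w],
           PySem.Int.bxor st.2 (PySem.Int.bxor st.2 w))) _ (by omega : (0:Int) ≤ 1)]
      rw [show List.drop (1:Int).toNat (x :: y :: t) = y :: t from rfl, findArray_loop]
      simp [PySem.List.pyGetD]
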